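-- pv_equiv track=rewrite | github.com/Squidysquid1/AOC2024 | day07/day07.py | checkWithRecursion
-- ===== SOURCE A (Python) =====
-- def checkWithRecursion(solution, nums, total = 0):
--     if solution == total:
--         return True
--     if len(nums) == 0:
--         return False
--     if total > solution:
--         return False
--
--     # + * ||
--     return (checkWithRecursion(solution, nums[1:], total + nums[0])
--             or checkWithRecursion(solution, nums[1:], total * nums[0]) )
-- ===== SOURCE B (Python) =====
-- def checkWithRecursion(solution, nums, total=0):
--     # Forward BFS over the deduplicated set of reachable totals, level per number,
--     # pruning totals > solution exactly as A's cut-off does.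
--     frontier = {total}
--     for n in nums:
--         if solution in frontier:
--             return True
--         live = [t for t in frontier if t <= solution]
--         if not live:
--             return False
--         frontier = {t + n for t in live} | {t * n for t in live}
--     return solution in frontier
-- ===== Notes on version B (the rewrite author's own statement) =====
-- stated objective: alternative
-- what changed: Replaces the exponential branching recursion by an iterative level-by-level set of deduplicated reachable totals with the same >solution pruning, succeeding on membership.
import Mathlib
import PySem

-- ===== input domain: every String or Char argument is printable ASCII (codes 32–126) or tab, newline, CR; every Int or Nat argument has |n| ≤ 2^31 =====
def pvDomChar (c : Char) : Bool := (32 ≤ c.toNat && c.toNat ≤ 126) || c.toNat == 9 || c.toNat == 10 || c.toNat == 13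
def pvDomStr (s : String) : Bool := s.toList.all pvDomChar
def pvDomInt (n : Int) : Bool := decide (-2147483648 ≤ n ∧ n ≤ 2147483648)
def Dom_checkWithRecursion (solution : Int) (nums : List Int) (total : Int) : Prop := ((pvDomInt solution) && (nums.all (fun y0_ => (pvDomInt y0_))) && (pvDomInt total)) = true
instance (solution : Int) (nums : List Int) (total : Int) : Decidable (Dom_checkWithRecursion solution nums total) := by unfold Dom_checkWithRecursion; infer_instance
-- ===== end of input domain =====

-- B replaces A's branching recursion by an iterative per-number set of deduplicated
-- reachable totals (same > solution pruning); objective: alternative algorithm.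

-- ===== PORT A =====
def checkWithRecursion (solution : Int) (nums : List Int) (total : Int) : Bool :=
  if solution == total then true
  else
    match nums with
    | [] => false
    | n :: rest =>
      if total > solution then false
      else checkWithRecursion solution rest (total + n)
           || checkWithRecursion solution rest (total * n)

-- ===== PORT B =====
def checkWithRecursionLoop (solution : Int) (nums : List Int) (frontier : PySem.Set Int) : Bool :=
  match nums with
  | [] => PySem.Set.contains frontier solution
  | n :: rest =>
    if PySem.Set.contains frontier solution then true
    else
      let live := frontier.filter (fun t => t ≤ solution)
      if live.isEmpty then false
      else
        checkWithRecursionLoop solution rest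
          (PySem.Set.union (PySem.Set.ofList (live.map (fun t => t + n)))
                           (PySem.Set.ofList (live.map (fun t => t * n))))

def checkWithRecursion_alt (solution : Int) (nums : List Int) (total : Int) : Bool :=
  checkWithRecursionLoop solution nums (PySem.Set.ofList [total])

-- ===== PRECONDITION & SPEC =====
def Spec_checkWithRecursion (solution : Int) (nums : List Int) (total : Int) (out : Bool) : Prop := out = checkWithRecursion_alt solution nums total
instance (solution : Int) (nums : List Int) (total : Int) (out : Bool) : Decidable (Spec_checkWithRecursion solution nums total out) := by unfold Spec_checkWithRecursion; infer_instance

-- ===== CLAIM (what is proved, stated in full; the proofs are below) =====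
def Claim_equal_checkWithRecursion : Prop := ∀ (solution : Int) (nums : List Int) (total : Int), Dom_checkWithRecursion solution nums total → Spec_checkWithRecursion solution nums total (checkWithRecursion solution nums total)

-- ===== LEMMAS AND PROOFS =====

-- The loop on a frontier S answers: does SOME total in S succeed under A's recursion?
theorem checkWithRecursionLoop_eq_any (nums : List Int) :
    ∀ (solution : Int) (S : PySem.Set Int),
      (checkWithRecursionLoop solution nums S = true ↔
        ∃ t ∈ S, checkWithRecursion solution nums t = true) := by
  induction nums with
  | nil =>
    intro solution S
    simp [checkWithRecursionLoop, checkWithRecursion, PySem.Set.contains]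
  | cons n rest ih =>
    intro solution S
    by_cases hmem : solution ∈ S
    · simp [checkWithRecursionLoop, PySem.Set.contains, hmem]
      exact ⟨solution, hmem, by simp [checkWithRecursion]⟩
    · simp only [checkWithRecursionLoop, PySem.Set.contains]
      rw [if_neg (by simpa [List.contains_iff_mem] using hmem)]
      by_cases hlive : (S.filter (fun t => t ≤ solution)).isEmpty
      · rw [if_pos hlive]
        have hall : ∀ t ∈ S, ¬ (t ≤ solution) := by
          intro t ht hle
          simp [List.isEmpty_iff, List.filter_eq_nil_iff] at hlive
          exact absurd (hlive t ht) (not_lt.mpr hle)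
        constructor
        · intro h; exact absurd h (by simp)
        · rintro ⟨t, ht, hchk⟩
          have hne : solution ≠ t := fun h => hmem (h ▸ ht)
          simp only [checkWithRecursion] at hchk
          rw [if_neg (by simpa using hne),
              if_pos (lt_of_not_ge fun h => hall t ht h)] at hchk
          exact absurd hchk (by simp)
      rw [if_neg hlive]
      rw [ih]
      constructor
      · rintro ⟨t, ht, hchk⟩
        simp only [PySem.Set.mem_union, PySem.Set.mem_ofList, List.mem_map, List.mem_filter] at ht
        rcases ht with ⟨s, ⟨hs, hle⟩, rfl⟩ | ⟨s, ⟨hs, hle⟩, rfl⟩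
        · refine ⟨s, hs, ?_⟩
          have hne : solution ≠ s := fun h => hmem (h ▸ hs)
          simp only [checkWithRecursion]
          rw [if_neg (by simpa using hne), if_neg (by simpa using hle)]
          simp [hchk]
        · refine ⟨s, hs, ?_⟩
          have hne : solution ≠ s := fun h => hmem (h ▸ hs)
          simp only [checkWithRecursion]
          rw [if_neg (by simpa using hne), if_neg (by simpa using hle)]
          simp [hchk]
      · rintro ⟨t, ht, hchk⟩
        have hne : solution ≠ t := fun h => hmem (h ▸ ht)
        simp only [checkWithRecursion] at hchk
        rw [if_neg (by simpa using hne)] at hchk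
        by_cases hgt : t > solution
        · rw [if_pos hgt] at hchk; exact absurd hchk (by simp)
        · rw [if_neg hgt] at hchk
          have hle : t ≤ solution := not_lt.mp hgt
          rcases Bool.or_eq_true_iff.mp hchk with h | h
          · exact ⟨t + n, by
              simp only [PySem.Set.mem_union, PySem.Set.mem_ofList, List.mem_map, List.mem_filter]
              exact Or.inl ⟨t, ⟨ht, by simpa using hle⟩, rfl⟩, h⟩
          · exact ⟨t * n, by
              simp only [PySem.Set.mem_union, PySem.Set.mem_ofList, List.mem_map, List.mem_filter]
              exact Or.inr ⟨t, ⟨ht, by simpa using hle⟩, rfl⟩, h⟩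

-- ===== VERDICT (by name: the statement is the Claim_ definition above) =====
theorem checkWithRecursion_spec : Claim_equal_checkWithRecursion := by
  intro solution nums total _
  unfold Spec_checkWithRecursion checkWithRecursion_alt
  have h := checkWithRecursionLoop_eq_any nums solution (PySem.Set.ofList [total])
  have hiff : checkWithRecursionLoop solution nums (PySem.Set.ofList [total]) = true ↔
      checkWithRecursion solution nums total = true := by
    rw [h]
    constructor
    · rintro ⟨t, ht, hc⟩
      have : t = total := by simpa [PySem.Set.mem_ofList] using ht
      rwa [this] at hc
    · intro hc; exact ⟨total, by simp [PySem.Set.mem_ofList], hc⟩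
  cases hA : checkWithRecursion solution nums total <;>
    cases hB : checkWithRecursionLoop solution nums (PySem.Set.ofList [total]) <;>
      simp_all
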